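-- pv_equiv track=rewrite | github.com/NoamAriel/bioinformatic_silk | libraries/amino_acid_group_motifs.py | _prune_combined_unique
-- ===== SOURCE A (Python) =====
-- from typing import Any, Dict, Iterable, List, Mapping, Optional, Sequence, Tuple
--
-- def is_repeated_motif(motif: str) -> bool:
--     """Return True if motif is a pure repetition of a shorter motif."""
--     L = len(motif)
--     for k in range(1, L // 2 + 1):
--         if L % k != 0:
--             continue
--         unit = motif[:k]
--         if unit * (L // k) == motif:
--             return True
--     return False
--
-- def _is_combined_motif(motif: str, motifs: set[str]) -> bool:
--     for i in range(1, len(motif)):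
--         if motif[:i] in motifs and motif[i:] in motifs:
--             return True
--     return False
--
-- def _prune_combined_unique(counts: Dict[str, int]) -> Dict[str, int]:
--     motif_set = set(counts.keys())
--     combined = {
--         motif
--         for motif in motif_set
--         if is_repeated_motif(motif) or _is_combined_motif(motif, motif_set)
--     }
--     return {motif: count for motif, count in counts.items() if motif not in combined}
-- ===== SOURCE B (Python) =====
-- def _prune_combined_unique(counts):
--     motifs = set(counts)
--
--     def _redundant(m):
--         # doubled-string idiom: m is a nontrivial repetition iff it occurs
--         # inside (m+m) with both ends chopped off
--         if m and m in (m + m)[1:-1]: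
--             return True
--         return any(m[:i] in motifs and m[i:] in motifs for i in range(1, len(m)))
--
--     return {m: c for m, c in counts.items() if not _redundant(m)}
-- ===== Notes on version B (the rewrite author's own statement) =====
-- stated objective: idiomatic
-- what changed: The repetition test 'try each divisor length and compare unit repetitions' is replaced by the doubled-string periodicity idiom 'motif in (motif+motif)[1:-1]', and the intermediate 'combined' set is dropped: the dict is filtered in one pass with a per-key redundancy test.
import Mathlib
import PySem

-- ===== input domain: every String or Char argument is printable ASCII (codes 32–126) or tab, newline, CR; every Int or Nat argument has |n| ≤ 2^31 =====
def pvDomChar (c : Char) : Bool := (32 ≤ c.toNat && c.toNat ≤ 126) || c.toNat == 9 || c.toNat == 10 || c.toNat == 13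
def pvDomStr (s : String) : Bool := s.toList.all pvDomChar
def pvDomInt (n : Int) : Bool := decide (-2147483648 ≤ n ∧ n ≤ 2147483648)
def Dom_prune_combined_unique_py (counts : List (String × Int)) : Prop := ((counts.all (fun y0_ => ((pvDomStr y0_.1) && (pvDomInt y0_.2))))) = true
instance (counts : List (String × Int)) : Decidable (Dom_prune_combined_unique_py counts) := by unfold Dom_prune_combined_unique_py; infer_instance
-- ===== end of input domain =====

-- B drops the intermediate 'combined' set and tests 'motif repeated' by the doubled-string
-- idiom (motif occurs in (motif+motif)[1:-1]) instead of enumerating divisor lengths (idiomatic rewrite).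


-- ===== PORT A =====
-- is_repeated_motif: for k in range(1, L//2+1): if L % k != 0: continue; if unit*(L//k) == motif: return True
-- strings are handled as List Char; `unit * n` is flatten (replicate n unit), exact for n ≥ 0;
-- L // k and L % k on the nonnegative length L use Nat / and %, which agree with Python's // and % here;
-- motif[:k] is List.take k, exact for k ≥ 0; the early-return loop is List.any over range(1, L//2+1).
def isRepeatedMotifA (m : List Char) : Bool :=
  let L := m.length
  (List.range' 1 (L / 2)).any (fun k =>
    if L % k ≠ 0 then false
    else ((List.replicate (L / k) (m.take k)).flatten = m : Bool))

-- _is_combined_motif: for i in range(1, len(motif)): if motif[:i] in motifs and motif[i:] in motifs: return True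
def isCombinedMotifA (m : List Char) (motifs : PySem.Set (List Char)) : Bool :=
  (List.range' 1 (m.length - 1)).any (fun i =>
    motifs.contains (m.take i) && motifs.contains (m.drop i))

def prune_combined_unique_py (counts : List (String × Int)) : List (String × Int) :=
  let motif_set : PySem.Set (List Char) := PySem.Set.ofList (counts.map (fun p => p.1.toList))
  let combined : List (List Char) :=
    motif_set.filter (fun motif => isRepeatedMotifA motif || isCombinedMotifA motif motif_set)
  counts.filter (fun p => !((PySem.Set.contains combined p.1.toList)))

-- ===== PORT B =====
-- _redundant: if m and m in (m+m)[1:-1]: return True; return any(m[:i] in motifs and m[i:] in motifs …)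
-- (m+m)[1:-1] for nonempty m is ((m++m).drop 1).dropLast (slice with start 1, stop -1, exact here);
-- `sub in s` is PySem.Chars.isIn.
def redundantB (m : List Char) (motifs : PySem.Set (List Char)) : Bool :=
  if (m ≠ [] : Bool) && PySem.Chars.isIn m (((m ++ m).drop 1).dropLast) then true
  else
    (List.range' 1 (m.length - 1)).any (fun i =>
      motifs.contains (m.take i) && motifs.contains (m.drop i))

def prune_combined_unique_py_alt (counts : List (String × Int)) : List (String × Int) :=
  let motifs : PySem.Set (List Char) := PySem.Set.ofList (counts.map (fun p => p.1.toList))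
  counts.filter (fun p => !(redundantB p.1.toList motifs))

-- ===== PRECONDITION & SPEC =====
def Spec_prune_combined_unique_py (counts : List (String × Int)) (out : List (String × Int)) : Prop := out = prune_combined_unique_py_alt counts
instance (counts : List (String × Int)) (out : List (String × Int)) : Decidable (Spec_prune_combined_unique_py counts out) := by unfold Spec_prune_combined_unique_py; infer_instance

-- ===== CLAIM (what is proved, stated in full; the proofs are below) =====
def Claim_equal_prune_combined_unique_py : Prop := ∀ (counts : List (String × Int)), Dom_prune_combined_unique_py counts → Spec_prune_combined_unique_py counts (prune_combined_unique_py counts)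

-- ===== LEMMAS AND PROOFS =====

-- rotate n is the n-th iterate of rotate 1
theorem pv_iterate_rotate {α : Type} (l : List α) (n : ℕ) :
    (fun t : List α => t.rotate 1)^[n] l = l.rotate n := by
  induction n generalizing l with
  | zero => simp
  | succ n ih =>
    rw [Function.iterate_succ_apply, ih, List.rotate_rotate]
    ring_nf

-- commuting words are powers of the shorter one
theorem pv_comm_pow {α : Type} (g : ℕ) (hg : 0 < g) :
    ∀ N (v u : List α), v.length ≤ N → u.length = g → u ++ v = v ++ u → g ∣ v.length →
      u ++ v = (List.replicate ((g + v.length) / g) u).flatten := by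
  intro N
  induction N with
  | zero =>
    intro v u hvN hu hcomm hdvd
    have hv : v = [] := by
      cases v with
      | nil => rfl
      | cons a t => simp at hvN
    subst hv
    simp [Nat.div_self hg]
  | succ N ih =>
    intro v u hvN hu hcomm hdvd
    by_cases hv : v = []
    · subst hv; simp [Nat.div_self hg]
    · -- v ≠ [], g ∣ |v| so g ≤ |v|
      have hvpos : 0 < v.length := List.length_pos_iff.mpr hv
      have hgle : g ≤ v.length := Nat.le_of_dvd hvpos hdvd
      -- u is a prefix of v
      have hupref : u <+: v := by
        have h1 : u <+: u ++ v := List.prefix_append u v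
        rw [hcomm] at h1
        exact List.prefix_of_prefix_length_le h1 (List.prefix_append v u) (by omega)
      obtain ⟨v', hv'⟩ := hupref
      have hcomm' : u ++ v' = v' ++ u := by
        have : u ++ (u ++ v') = (u ++ v') ++ u := by rw [hv']; exact hcomm
        simpa [List.append_assoc, List.append_cancel_left_eq] using this
      have hlen' : v'.length = v.length - g := by
        have := congrArg List.length hv'
        simp [hu] at this
        omega
      have hdvd' : g ∣ v'.length := by
        rw [hlen']
        exact Nat.dvd_sub hdvd ⟨1, by omega⟩
      have hrec := ih v' u (by omega) hu hcomm' hdvd'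
      subst hv'
      have hL : (g + (u ++ v').length) / g = (g + v'.length) / g + 1 := by
        have h1 : g + (u ++ v').length = (g + v'.length) + g := by simp [hu]; omega
        rw [h1, Nat.add_div_right _ hg]
      rw [hL, List.replicate_succ, List.flatten_cons, ← hrec]

-- rotation by a positive divisor makes the word a power of its prefix
theorem pv_rotate_pow {α : Type} (m : List α) (g : ℕ) (hg : 0 < g) (hgd : g ∣ m.length)
    (hrot : m.rotate g = m) :
    m = (List.replicate (m.length / g) (m.take g)).flatten := by
  by_cases hm : m = []
  · subst hm; simp
  · have hL : 0 < m.length := List.length_pos_iff.mpr hm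
    have hgL : g ≤ m.length := Nat.le_of_dvd hL hgd
    have hd : m.drop g ++ m.take g = m := by
      rw [← List.rotate_eq_drop_append_take hgL]; exact hrot
    have hcomm : m.take g ++ m.drop g = m.drop g ++ m.take g := by
      rw [List.take_append_drop, hd]
    have hulen : (m.take g).length = g := by simp; omega
    have hvlen : g ∣ (m.drop g).length := by
      simp only [List.length_drop]
      exact Nat.dvd_sub hgd dvd_rfl
    have h := pv_comm_pow g hg (m.drop g).length (m.drop g) (m.take g) le_rfl hulen hcomm hvlen
    rw [List.take_append_drop] at h
    have hlen : g + (m.drop g).length = m.length := by simp; omega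
    rw [hlen] at h
    exact h

-- a power of its k-prefix rotates by k to itself
theorem pv_pow_rotate {α : Type} (m : List α) (k : ℕ) (hk : 0 < k) (hkL : k ≤ m.length)
    (_hkd : k ∣ m.length)
    (heq : (List.replicate (m.length / k) (m.take k)).flatten = m) :
    m.rotate k = m := by
  have hL : 0 < m.length := by omega
  set u := m.take k with hu
  have hulen : u.length = k := by simp [hu]; omega
  set n := m.length / k with hn
  have hnpos : 0 < n := Nat.div_pos hkL hk
  have hsplit : m = u ++ (List.replicate (n - 1) u).flatten := by
    conv_lhs => rw [← heq]
    rw [show n = (n - 1) + 1 by omega, List.replicate_succ, List.flatten_cons]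
    simp
  have hdrop : m.drop k = (List.replicate (n - 1) u).flatten := by
    conv_lhs => rw [hsplit]
    rw [← hulen, List.drop_left]
  have htake : m.take k = u := rfl
  rw [List.rotate_eq_drop_append_take hkL, hdrop, htake]
  conv_rhs => rw [← heq]
  rw [show n = (n - 1) + 1 by omega, List.replicate_succ', List.flatten_append]
  simp

-- the substring-of-double characterisation: for nonempty m
theorem pv_infix_iff_rotate {α : Type} (m : List α) (hm : m ≠ []) :
    (m <:+: ((m ++ m).drop 1).dropLast) ↔ ∃ r, 1 ≤ r ∧ r ≤ m.length - 1 ∧ m.rotate r = m := by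
  have hL : 0 < m.length := List.length_pos_iff.mpr hm
  -- the doubled-and-trimmed word
  have hD : ((m ++ m).drop 1).dropLast = m.drop 1 ++ m.dropLast := by
    rw [List.drop_append_of_le_length (by omega), List.dropLast_append_of_ne_nil hm]
  -- a drop of D, for j ≤ |m| - 1
  have hDdrop : ∀ j, j ≤ m.length - 1 →
      (((m ++ m).drop 1).dropLast).drop j = m.drop (1 + j) ++ m.dropLast := by
    intro j hj
    rw [hD, List.drop_append_of_le_length (by simp; omega), List.drop_drop]
  constructor
  · rintro ⟨s, t, hst⟩
    have hlen := congrArg List.length hst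
    rw [hD] at hlen
    simp at hlen
    have hL2 : 2 ≤ m.length := by omega
    have hj : s.length ≤ m.length - 2 := by omega
    set r := s.length + 1 with hr
    refine ⟨r, by omega, by omega, ?_⟩
    have h1 : m.drop (1 + s.length) ++ m.dropLast = m ++ t := by
      rw [← hDdrop s.length (by omega), ← hst, List.append_assoc, List.drop_left]
    have h2 : (m.drop (1 + s.length) ++ m.dropLast).take m.length = m := by
      rw [h1]; simp
    have hdl : (m.drop (1 + s.length)).length = m.length - r := by simp; omega
    have h3 : (m.drop (1 + s.length) ++ m.dropLast).take m.length
        = m.drop (1 + s.length) ++ m.dropLast.take r := by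
      rw [show m.length = (m.drop (1 + s.length)).length + r by omega]
      exact List.take_length_add_append r
    rw [h3] at h2
    have h4 : m.dropLast.take r = m.take r := by
      rw [List.dropLast_eq_take, List.take_take, min_eq_left (by omega)]
    rw [h4] at h2
    have h5 : m.drop (1 + s.length) = m.drop r := by rw [hr, Nat.add_comm]
    rw [h5] at h2
    rw [List.rotate_eq_drop_append_take (by omega : r ≤ m.length)]
    exact h2
  · rintro ⟨r, hr1, hr2, hrot⟩
    rw [List.infix_iff_prefix_suffix]
    refine ⟨(((m ++ m).drop 1).dropLast).drop (r - 1), ?_, List.drop_suffix _ _⟩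
    rw [hDdrop (r - 1) (by omega), show 1 + (r - 1) = r by omega]
    have hpre : m.take r <+: m.dropLast := by
      rw [List.dropLast_eq_take]
      have := List.take_prefix r (m.take (m.length - 1))
      rwa [List.take_take, min_eq_left (by omega)] at this
    have := (List.prefix_append_right_inj (m.drop r)).mpr hpre
    rwa [← List.rotate_eq_drop_append_take (by omega : r ≤ m.length), hrot] at this

-- the core equivalence of the two repetition tests
-- rotation invariance under gcd of two periods, via iterates of rotate 1
theorem pv_rotate_gcd {α : Type} (m : List α) (r : ℕ) (hrot : m.rotate r = m) :
    m.rotate (Nat.gcd r m.length) = m := by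
  have h1 : Function.IsPeriodicPt (fun t : List α => t.rotate 1) r m := by
    show (fun t : List α => t.rotate 1)^[r] m = m
    rw [pv_iterate_rotate]; exact hrot
  have h2 : Function.IsPeriodicPt (fun t : List α => t.rotate 1) m.length m := by
    show (fun t : List α => t.rotate 1)^[m.length] m = m
    rw [pv_iterate_rotate]; exact List.rotate_length m
  have := h1.gcd h2
  rw [Function.IsPeriodicPt, Function.IsFixedPt, pv_iterate_rotate] at this
  exact this

theorem pv_repeated_eq (m : List Char) :
    isRepeatedMotifA m =
      ((m ≠ [] : Bool) && PySem.Chars.isIn m (((m ++ m).drop 1).dropLast)) := by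
  rw [Bool.eq_iff_iff]
  simp only [isRepeatedMotifA, List.any_eq_true, List.mem_range'_1, Bool.and_eq_true,
    decide_eq_true_eq, PySem.Chars.isIn_iff_infix]
  constructor
  · rintro ⟨k, ⟨hk1, hk2⟩, hbody⟩
    by_cases hmod : m.length % k = 0
    swap
    · simp [hmod] at hbody
    · have heq : (List.replicate (m.length / k) (m.take k)).flatten = m := by
        simpa [hmod] using hbody
      have hL2 : 2 ≤ m.length := by omega
      have hm : m ≠ [] := by intro h; subst h; simp at hL2
      refine ⟨hm, (pv_infix_iff_rotate m hm).mpr ⟨k, hk1, by omega, ?_⟩⟩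
      exact pv_pow_rotate m k (by omega) (by omega) (Nat.dvd_of_mod_eq_zero hmod) heq
  · rintro ⟨hm, hinf⟩
    obtain ⟨r, hr1, hr2, hrot⟩ := (pv_infix_iff_rotate m hm).mp hinf
    have hL : 0 < m.length := List.length_pos_iff.mpr hm
    set g := Nat.gcd r m.length with hg
    have hgpos : 0 < g := Nat.gcd_pos_of_pos_left _ (by omega)
    have hgd : g ∣ m.length := Nat.gcd_dvd_right r m.length
    have hgr : g ≤ r := Nat.gcd_le_left _ (by omega)
    have hglt : g < m.length := by omega
    have hghalf : g ≤ m.length / 2 := by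
      obtain ⟨c, hc⟩ := hgd
      have hc2 : 2 ≤ c := by
        by_contra hcc
        interval_cases c <;> omega
      rw [Nat.le_div_iff_mul_le (by omega)]
      calc g * 2 ≤ g * c := Nat.mul_le_mul_left g hc2
        _ = m.length := hc.symm
    have hrotg : m.rotate g = m := pv_rotate_gcd m r hrot
    have hpow := pv_rotate_pow m g hgpos hgd hrotg
    have hmod0 : m.length % g = 0 := by
      obtain ⟨c, hc⟩ := hgd; rw [hc]; exact Nat.mul_mod_right g c
    refine ⟨g, ⟨hgpos, by omega⟩, ?_⟩
    simp [hmod0]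
    exact hpow.symm

theorem pv_contains_filter (s : List (List Char)) (f : List Char → Bool) (x : List Char)
    (hx : x ∈ s) : PySem.Set.contains (s.filter f) x = f x := by
  cases hfx : f x
  · apply Bool.eq_false_iff.mpr
    intro hc
    have hmem := (PySem.Set.contains_iff _ _).mp hc
    rw [List.mem_filter] at hmem
    simp [hfx] at hmem
  · exact (PySem.Set.contains_iff _ _).mpr (List.mem_filter.mpr ⟨hx, hfx⟩)

theorem prune_eq (counts : List (String × Int)) :
    prune_combined_unique_py counts = prune_combined_unique_py_alt counts := by
  simp only [prune_combined_unique_py, prune_combined_unique_py_alt]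
  apply List.filter_congr
  intro p hp
  have hx : p.1.toList ∈ PySem.Set.ofList (counts.map (fun q => q.1.toList)) := by
    rw [PySem.Set.mem_ofList]
    exact List.mem_map.mpr ⟨p, hp, rfl⟩
  have hkey : PySem.Set.contains
      ((PySem.Set.ofList (counts.map (fun q => q.1.toList))).filter
        (fun motif => isRepeatedMotifA motif ||
          isCombinedMotifA motif (PySem.Set.ofList (counts.map (fun q => q.1.toList)))))
      p.1.toList
      = redundantB p.1.toList (PySem.Set.ofList (counts.map (fun q => q.1.toList))) := by
    rw [pv_contains_filter _ _ _ hx]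
    rw [redundantB, isCombinedMotifA, pv_repeated_eq]
    cases h : ((p.1.toList ≠ [] : Bool) &&
        PySem.Chars.isIn p.1.toList (((p.1.toList ++ p.1.toList).drop 1).dropLast))
    · simp [h]
    · simp [h]
  rw [hkey]

-- ===== VERDICT (by name: the statement is the Claim_ definition above) =====
theorem prune_combined_unique_py_spec : Claim_equal_prune_combined_unique_py := by
  intro counts _
  exact prune_eq counts
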